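-- pv_equiv track=rewrite | github.com/AlekseiVoron/InfoProtection | make_alphabet.py | make_alphabet_dicts_from_str
-- ===== SOURCE A (Python) =====
-- def make_alphabet_dicts_from_str(s: str, start_num=1111) -> (dict, dict):
--     if start_num < 0 or start_num > pow(10, 20):
--         raise Exception('Wrong start_num!')
--     i = start_num
--     num_char = dict()
--     char_num = dict()
--     for ch in s:
--         while '0' in str(i):
--             i = i + 1
--         num_char[i] = ch
--         char_num[ch] = i
--         i = i + 1
--     return num_char, char_num
-- ===== SOURCE B (Python) =====
-- def _next_zero_free(i):
--     # smallest j >= i whose decimal representation has no digit '0',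
--     # found by digit arithmetic instead of counting upwards
--     if i == 0:
--         return 1
--     p, q, t = 0, i, 1
--     while q > 0:
--         if q % 10 == 0:
--             p = t * 10          # remember (power above) the highest zero digit
--         q //= 10
--         t *= 10
--     if p == 0:
--         return i                # i already zero-free
--     # clear everything below the highest zero digit and set it all to 1s
--     return i // p * p + (p - 1) // 9
--
--
-- def make_alphabet_dicts_from_str(s: str, start_num=1111) -> (dict, dict):
--     if start_num < 0 or start_num > pow(10, 20):
--         raise Exception('Wrong start_num!')
--     codes = []
--     i = start_num
--     for _ in s:
--         i = _next_zero_free(i)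
--         codes.append(i)
--         i = i + 1
--     return dict(zip(codes, s)), dict(zip(s, codes))
-- ===== Notes on version B (the rewrite author's own statement) =====
-- stated objective: alternative
-- what changed: A finds each code by incrementing i one-by-one past every number whose decimal representation contains a zero digit while filling both dicts inside the same loop; B jumps directly to the next zero-free code by digit arithmetic (locate the highest zero digit of i and replace it and everything below it by 1s), collects the codes in a list, and builds the two dicts by zipping that list with the characters.
import Mathlib
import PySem

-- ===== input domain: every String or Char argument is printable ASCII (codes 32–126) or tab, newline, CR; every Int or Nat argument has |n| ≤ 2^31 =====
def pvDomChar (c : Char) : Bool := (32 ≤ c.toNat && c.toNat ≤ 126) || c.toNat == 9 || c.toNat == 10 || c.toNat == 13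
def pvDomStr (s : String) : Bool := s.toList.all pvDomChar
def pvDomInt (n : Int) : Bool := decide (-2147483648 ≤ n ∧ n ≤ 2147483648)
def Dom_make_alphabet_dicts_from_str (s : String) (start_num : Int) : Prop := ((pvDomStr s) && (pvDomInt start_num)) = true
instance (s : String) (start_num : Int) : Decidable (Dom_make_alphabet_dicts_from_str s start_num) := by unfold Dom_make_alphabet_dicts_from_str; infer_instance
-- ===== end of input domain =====

-- B replaces A's unit-step increment-past-every-number-with-a-zero-digit scan by a direct
-- digit-arithmetic jump to the next zero-free code, and builds both dicts by zipping a code list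
-- computed first (objective: alternative algorithm, same observable result).

-- ===== PORT A =====
-- while '0' in str(i): i = i + 1   (fuel-guarded; the fuel 2*i+2 provably suffices, see pvSkipZeros_eq_lzf)
def pvSkipZeros : Nat → Int → Int
  | 0, i => i
  | fuel+1, i => if PySem.Str.isIn "0" (PySem.Int.toStr i) then pvSkipZeros fuel (i + 1) else i

def make_alphabet_dicts_from_str (s : String) (start_num : Int) : (List (Int × String)) × (List (String × Int)) :=
  let fin := s.toList.foldl
    (fun (st : Int × PySem.Dict Int String × PySem.Dict String Int) ch =>
      let i := pvSkipZeros (2 * st.1 + 2).toNat st.1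
      (i + 1, st.2.1.insert i (String.ofList [ch]), st.2.2.insert (String.ofList [ch]) i))
    (start_num, PySem.Dict.empty, PySem.Dict.empty)
  (fin.2.1.items, fin.2.2.items)

-- ===== PORT B =====
-- the scan of Source B's _next_zero_free: p, q, t = 0, i, 1; while q > 0: ...
def pvScanP (q t p : Int) : Int :=
  if h : 0 < q then
    pvScanP (PySem.Int.floordiv q 10) (t * 10) (if PySem.Int.mod q 10 = 0 then t * 10 else p)
  else p
termination_by q.toNat
decreasing_by
  have hq : PySem.Int.floordiv q 10 = q / 10 := PySem.Int.floordiv_eq_ediv_of_pos (by norm_num)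
  rw [hq]; omega

def pvNextZeroFree (i : Int) : Int :=
  if i = 0 then 1
  else
    let p := pvScanP i 1 0
    if p = 0 then i
    else PySem.Int.floordiv i p * p + PySem.Int.floordiv (p - 1) 9

def make_alphabet_dicts_from_str_alt (s : String) (start_num : Int) : (List (Int × String)) × (List (String × Int)) :=
  let codes := (s.toList.foldl (fun (st : Int × List Int) _ =>
      let i := pvNextZeroFree st.1
      (i + 1, st.2 ++ [i])) (start_num, ([] : List Int))).2
  let chars := s.toList.map (fun ch => String.ofList [ch])
  ((PySem.Dict.ofList (codes.zip chars)).items, (PySem.Dict.ofList (chars.zip codes)).items)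

-- ===== PRECONDITION & SPEC =====
-- A raises an exception exactly when start_num < 0 or start_num > 10^20; Pre_ excludes those inputs.
def Pre_make_alphabet_dicts_from_str (s : String) (start_num : Int) : Prop :=
  0 ≤ start_num ∧ start_num ≤ 10 ^ 20
instance (s : String) (start_num : Int) : Decidable (Pre_make_alphabet_dicts_from_str s start_num) := by unfold Pre_make_alphabet_dicts_from_str; infer_instance

def pvWitness_make_alphabet_dicts_from_str : String × Int := ("ab c", 1111)

def Spec_make_alphabet_dicts_from_str (s : String) (start_num : Int) (out : (List (Int × String)) × (List (String × Int))) : Prop := out = make_alphabet_dicts_from_str_alt s start_num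
instance (s : String) (start_num : Int) (out : (List (Int × String)) × (List (String × Int))) : Decidable (Spec_make_alphabet_dicts_from_str s start_num out) := by unfold Spec_make_alphabet_dicts_from_str; infer_instance

-- ===== CLAIM (what is proved, stated in full; the proofs are below) =====
def Claim_equal_make_alphabet_dicts_from_str : Prop := ∀ (s : String) (start_num : Int), Dom_make_alphabet_dicts_from_str s start_num → Pre_make_alphabet_dicts_from_str s start_num → Spec_make_alphabet_dicts_from_str s start_num (make_alphabet_dicts_from_str s start_num)

-- ===== LEMMAS AND PROOFS =====

-- "q (> 0) has a decimal digit 0"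
def pvZ (q : Nat) : Bool :=
  if h : q = 0 then false else (q % 10 == 0) || pvZ (q / 10)
termination_by q
decreasing_by exact Nat.div_lt_self (by omega) (by norm_num)

-- position (power-of-ten exponent) of the highest digit 0 of q
def pvHz (q : Nat) : Nat :=
  if h : q = 0 then 0 else if pvZ (q / 10) then pvHz (q / 10) + 1 else 0
termination_by q
decreasing_by exact Nat.div_lt_self (by omega) (by norm_num)

-- "'0' ∈ str(n)" at the Nat level (str(0) = "0" contains '0')
def pvHasZ (n : Nat) : Bool := if n = 0 then true else pvZ n

-- repunit 11…1 with k ones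
def pvRep : Nat → Nat
  | 0 => 0
  | k+1 => 10 * pvRep k + 1

lemma pvRep_ge (k : Nat) : k ≤ pvRep k := by
  induction k with
  | zero => simp [pvRep]
  | succ k ih => simp [pvRep]; omega

lemma pvRep_mul_nine (k : Nat) : 9 * pvRep k + 1 = 10 ^ k := by
  induction k with
  | zero => simp [pvRep]
  | succ k ih => rw [pvRep, pow_succ]; omega

lemma pvRep_lt_pow (k : Nat) : pvRep k < 10 ^ k := by
  have := pvRep_mul_nine k; omega

lemma pow_le_pvRep (k : Nat) : 10 ^ k ≤ pvRep (k + 1) := by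
  induction k with
  | zero => simp [pvRep]
  | succ k ih => rw [pvRep, pow_succ]; omega

lemma pvZ_zero : pvZ 0 = false := by rw [pvZ]; simp

lemma pvZ_eq (q : Nat) (h : q ≠ 0) : pvZ q = ((q % 10 == 0) || pvZ (q / 10)) := by
  rw [pvZ]; simp [h]

lemma pvHasZ_eq (n : Nat) (h : n ≠ 0) : pvHasZ n = pvZ n := by simp [pvHasZ, h]

lemma pvHasZ_pvRep (k : Nat) (hk : 0 < k) : pvHasZ (pvRep k) = false := by
  induction k with
  | zero => omega
  | succ k ih =>
    have hr : pvZ (pvRep k) = false := by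
      rcases Nat.eq_zero_or_pos k with h0 | hpos
      · subst h0; exact pvZ_zero
      · have hk1 : pvRep k ≠ 0 := by have := pvRep_ge k; omega
        rw [← pvHasZ_eq _ hk1]; exact ih hpos
    have hN : pvRep (k + 1) = 10 * pvRep k + 1 := rfl
    have hne : pvRep (k + 1) ≠ 0 := by omega
    rw [pvHasZ_eq _ hne, pvZ_eq _ hne, hN]
    have h1 : (10 * pvRep k + 1) % 10 = 1 := by omega
    have h2 : (10 * pvRep k + 1) / 10 = pvRep k := by omega
    simp [h1, h2, hr]

lemma pvExists_nozero (n : Nat) : ∃ k, pvHasZ (n + k) = false := by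
  refine ⟨pvRep (n + 1) - n, ?_⟩
  have h1 : n + 1 ≤ pvRep (n + 1) := pvRep_ge (n + 1)
  have h2 : n + (pvRep (n + 1) - n) = pvRep (n + 1) := by omega
  rw [h2]; exact pvHasZ_pvRep (n + 1) (by omega)

-- least zero-free number ≥ n
def pvLzf (n : Nat) : Nat := n + Nat.find (pvExists_nozero n)

lemma pvLzf_ge (n : Nat) : n ≤ pvLzf n := Nat.le_add_right n _

lemma pvLzf_nozero (n : Nat) : pvHasZ (pvLzf n) = false := Nat.find_spec (pvExists_nozero n)

lemma pvLzf_min (n j : Nat) (h1 : n ≤ j) (h2 : j < pvLzf n) : pvHasZ j = true := by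
  have := Nat.find_min (pvExists_nozero n) (m := j - n) (by unfold pvLzf at h2; omega)
  have hj : n + (j - n) = j := by omega
  rw [hj] at this
  simpa using this

lemma pvLzf_eq (n m : Nat) (h1 : n ≤ m) (h2 : pvHasZ m = false)
    (h3 : ∀ j, n ≤ j → j < m → pvHasZ j = true) : pvLzf n = m := by
  rcases lt_trichotomy (pvLzf n) m with h | h | h
  · have := h3 (pvLzf n) (pvLzf_ge n) h
    rw [pvLzf_nozero n] at this; cases this
  · exact h
  · have := pvLzf_min n m h1 h
    rw [h2] at this; cases this
  
lemma pvLzf_of_nozero (n : Nat) (h : pvHasZ n = false) : pvLzf n = n :=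
  pvLzf_eq n n le_rfl h (fun j h1 h2 => by omega)

lemma pvLzf_succ (n : Nat) (h : pvHasZ n = true) : pvLzf (n + 1) = pvLzf n := by
  have hne : pvLzf n ≠ n := by
    intro he; have := pvLzf_nozero n; rw [he, h] at this; cases this
  have hge : n + 1 ≤ pvLzf n := by have := pvLzf_ge n; omega
  exact pvLzf_eq (n + 1) (pvLzf n) hge (pvLzf_nozero n)
    (fun j h1 h2 => pvLzf_min n j (by omega) h2)

-- ---- bridge: '0' ∈ str(i) ↔ pvHasZ ----

lemma pvDigitChar_eq_zero (d : Nat) (h : d < 10) : (Nat.digitChar d = '0') ↔ d = 0 := by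
  interval_cases d <;> simp [Nat.digitChar]

lemma pvMem_toDigitsCore (fuel : Nat) : ∀ (n : Nat) (ds : List Char), n ≤ fuel →
    ('0' ∈ Nat.toDigitsCore 10 (fuel + 1) n ds ↔ (pvHasZ n = true ∨ '0' ∈ ds)) := by
  induction fuel with
  | zero =>
    intro n ds hn
    interval_cases n
    rw [Nat.toDigitsCore]
    simp [pvHasZ, Nat.digitChar]
  | succ fuel ih =>
    intro n ds hn
    rw [Nat.toDigitsCore]
    by_cases h0 : n / 10 = 0
    · have hn10 : n < 10 := by omega
      rw [if_pos h0]
      have hd : ((n % 10).digitChar = '0') ↔ n % 10 = 0 := pvDigitChar_eq_zero _ (by omega)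
      have hz : (pvHasZ n = true) ↔ n % 10 = 0 := by
        rcases Nat.eq_zero_or_pos n with h | h
        · subst h; simp [pvHasZ]
        · rw [pvHasZ_eq _ (by omega), pvZ_eq _ (by omega), h0, pvZ_zero]
          simp
      have hd' : ('0' = (n % 10).digitChar) ↔ n % 10 = 0 := eq_comm.trans hd
      simp only [List.mem_cons, hd', hz]
    · rw [if_neg h0]
      have hlt : n / 10 < n := Nat.div_lt_self (by omega) (by norm_num)
      have hfuel : n / 10 ≤ fuel := by omega
      rw [ih (n / 10) _ hfuel]
      have hne : n ≠ 0 := by omega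
      have hz : pvHasZ n = ((n % 10 == 0) || pvHasZ (n / 10)) := by
        rw [pvHasZ_eq _ hne, pvZ_eq _ hne, pvHasZ_eq _ h0]
      have hd : ((n % 10).digitChar = '0') ↔ n % 10 = 0 := pvDigitChar_eq_zero _ (by omega)
      have hd' : ('0' = (n % 10).digitChar) ↔ n % 10 = 0 := eq_comm.trans hd
      simp only [List.mem_cons, hd', hz, Bool.or_eq_true, beq_iff_eq]
      tauto

lemma pvMem_toDigits (n : Nat) : '0' ∈ Nat.toDigits 10 n ↔ pvHasZ n = true := by
  have := pvMem_toDigitsCore n n [] le_rfl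
  simpa [Nat.toDigits] using this

lemma pvCond_bridge (i : Int) (h : 0 ≤ i) :
    PySem.Str.isIn "0" (PySem.Int.toStr i) = pvHasZ i.toNat := by
  have hiff : PySem.Str.isIn "0" (PySem.Int.toStr i) = true ↔ pvHasZ i.toNat = true := by
    rw [PySem.Str.isIn_iff_infix, PySem.Int.toList_toStr, PySem.Int.toChars, if_neg (by omega)]
    rw [show ("0" : String).toList = ['0'] from rfl, List.singleton_infix_iff]
    exact pvMem_toDigits i.toNat
  cases hb : PySem.Str.isIn "0" (PySem.Int.toStr i)
  · cases hz : pvHasZ i.toNat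
    · rfl
    · rw [← hiff] at hz; rw [hb] at hz; cases hz
  · exact (hiff.mp hb).symm

-- ---- scan characterisation ----

lemma pvScanP_spec (q : Nat) : ∀ (t p : Int),
    pvScanP (q : Int) t p = if pvZ q then t * (10 : Int) ^ (pvHz q + 1) else p := by
  induction q using Nat.strong_induction_on with
  | _ q ih =>
    intro t p
    have hfd : PySem.Int.floordiv (q : Int) 10 = ((q / 10 : Nat) : Int) := by
      exact_mod_cast PySem.Int.floordiv_natCast q 10
    have hmd : PySem.Int.mod (q : Int) 10 = ((q % 10 : Nat) : Int) := by
      exact_mod_cast PySem.Int.mod_natCast q 10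
    rcases Nat.eq_zero_or_pos q with h0 | hpos
    · subst h0
      rw [pvScanP]
      simp [pvZ_zero]
    · have hlt : q / 10 < q := Nat.div_lt_self (by omega) (by norm_num)
      rw [pvScanP, dif_pos (by exact_mod_cast hpos), hfd, hmd, ih (q / 10) hlt]
      have hzq : pvZ q = ((q % 10 == 0) || pvZ (q / 10)) := pvZ_eq q (by omega)
      have hhz : pvHz q = if pvZ (q / 10) then pvHz (q / 10) + 1 else 0 := by
        rw [pvHz, dif_neg (by omega)]
      by_cases hz : pvZ (q / 10) = true
      · rw [if_pos hz, hzq, hz]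
        rw [if_pos (by simp), hhz, if_pos hz, pow_succ]
        ring
      · rw [Bool.not_eq_true] at hz
        by_cases hm : q % 10 = 0
        · simp [hzq, hhz, hz, hm, pow_one]
        · have h1 : ¬ ((10 : Int) ∣ (q : Int)) := by omega
          simp [hzq, hz, hm, h1]

lemma pvHz_spec (q : Nat) (h : pvZ q = true) :
    (q / 10 ^ pvHz q) % 10 = 0 ∧ pvZ (q / 10 ^ (pvHz q + 1)) = false ∧ 10 ≤ q / 10 ^ pvHz q := by
  induction q using Nat.strong_induction_on with
  | _ q ih =>
    have hq0 : q ≠ 0 := by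
      rintro rfl; rw [pvZ_zero] at h; cases h
    have hlt : q / 10 < q := Nat.div_lt_self (by omega) (by norm_num)
    rw [pvHz, dif_neg hq0]
    by_cases hz : pvZ (q / 10) = true
    · obtain ⟨h1, h2, h3⟩ := ih (q / 10) hlt hz
      rw [if_pos hz]
      have hdiv : ∀ m : Nat, q / 10 ^ (m + 1) = (q / 10) / 10 ^ m := by
        intro m
        rw [Nat.div_div_eq_div_mul, pow_succ, mul_comm (10 ^ m) 10, ← Nat.div_div_eq_div_mul]
      constructor
      · rw [hdiv]; exact h1
      · constructor
        · rw [hdiv]; exact h2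
        · rw [hdiv]; exact h3
    · rw [if_neg hz]
      have hm : q % 10 = 0 := by
        rw [pvZ_eq q hq0] at h
        rcases Bool.or_eq_true_iff.mp h with h' | h'
        · simpa using h'
        · exact absurd h' hz
      refine ⟨by simpa using hm, by simpa [pow_one] using (Bool.not_eq_true _).mp hz, by simpa using (by omega : 10 ≤ q)⟩

-- a zero-free prefix followed by ones is zero-free
lemma pvNozero_concat (k : Nat) : ∀ P : Nat, 1 ≤ P → pvZ P = false →
    pvHasZ (P * 10 ^ k + pvRep k) = false := by
  induction k with
  | zero =>
    intro P h1 h2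
    simpa [pvRep, pvHasZ_eq P (by omega)] using h2
  | succ k ih =>
    intro P h1 h2
    have hN : P * 10 ^ (k + 1) + pvRep (k + 1) = 10 * (P * 10 ^ k + pvRep k) + 1 := by
      rw [pvRep, pow_succ]; ring
    set M := P * 10 ^ k + pvRep k with hM
    have hMpos : 1 ≤ M := by
      nlinarith [Nat.one_le_pow k 10 (by norm_num : 0 < 10)]
    rw [hN, pvHasZ_eq _ (by omega), pvZ_eq _ (by omega)]
    have hmod : (10 * M + 1) % 10 = 1 := by omega
    have hdiv : (10 * M + 1) / 10 = M := by omega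
    have hZM : pvZ M = false := by
      rw [← pvHasZ_eq _ (by omega)]; exact ih P h1 h2
    simp [hmod, hdiv, hZM]

-- anything strictly below the ones-tail has a zero digit
lemma pvZero_below_rep (k : Nat) : ∀ P m : Nat, 1 ≤ P → m < pvRep (k + 1) →
    pvZ (P * 10 ^ (k + 1) + m) = true := by
  induction k with
  | zero =>
    intro P m h1 h2
    have hm : m = 0 := by simpa [pvRep] using h2
    subst hm
    have hx : P * 10 ^ 1 + 0 = 10 * P := by ring
    rw [hx, pvZ_eq _ (by omega)]
    simp [Nat.mul_mod_right]
  | succ k ih =>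
    intro P m h1 h2
    have hpow : 1 ≤ 10 ^ (k + 2) := Nat.one_le_pow _ _ (by norm_num)
    have hx0 : P * 10 ^ (k + 2) + m ≠ 0 := by nlinarith
    rw [pvZ_eq _ hx0]
    by_cases hm : m % 10 = 0
    · have : (P * 10 ^ (k + 2) + m) % 10 = 0 := by
        have h10 : 10 ∣ P * 10 ^ (k + 2) := by
          exact Dvd.dvd.mul_left (dvd_pow_self 10 (by omega)) P
        omega
      simp [this]
    · have hrep : m < 10 * pvRep (k + 1) := by
        have := h2; rw [pvRep] at this
        rcases Nat.lt_or_ge m (10 * pvRep (k + 1)) with h | h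
        · exact h
        · exfalso
          have hm10 : m = 10 * pvRep (k + 1) := by omega
          rw [hm10] at hm; omega
      have hdiv : (P * 10 ^ (k + 2) + m) / 10 = P * 10 ^ (k + 1) + m / 10 := by
        have : P * 10 ^ (k + 2) = 10 * (P * 10 ^ (k + 1)) := by rw [pow_succ]; ring
        omega
      have hmd : m / 10 < pvRep (k + 1) := by
        exact Nat.div_lt_of_lt_mul (by omega)
      have := ih P (m / 10) h1 hmd
      rw [hdiv] at *
      simp [this]

-- ---- pvLzf closed form on numbers with a zero digit ----

lemma pvLzf_char (n : Nat) (h : pvZ n = true) :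
    pvLzf n = n / 10 ^ (pvHz n + 1) * 10 ^ (pvHz n + 1) + pvRep (pvHz n + 1) := by
  have hn0 : n ≠ 0 := by rintro rfl; rw [pvZ_zero] at h; cases h
  obtain ⟨hd, hnz, h10⟩ := pvHz_spec n h
  set k := pvHz n with hk
  set p := 10 ^ (k + 1) with hp
  have hppos : 0 < p := Nat.pow_pos (by norm_num)
  have hdd : n / p = n / 10 ^ k / 10 := by
    rw [hp, pow_succ, Nat.div_div_eq_div_mul]
  have hP1 : 1 ≤ n / p := by rw [hdd]; omega
  set P := n / p with hPd
  have hm : n % p < 10 ^ k := by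
    have h1 : n % p / 10 ^ k = n / 10 ^ k % 10 := by
      rw [hp, pow_succ]; exact Nat.mod_mul_right_div_self n (10 ^ k) 10
    rw [hd] at h1
    have hk0 : 0 < 10 ^ k := Nat.pow_pos (by norm_num)
    exact (Nat.div_eq_zero_iff).mp h1 |>.resolve_left (by omega)
  have hrepge : 10 ^ k ≤ pvRep (k + 1) := pow_le_pvRep k
  have hreplt : pvRep (k + 1) < p := pvRep_lt_pow (k + 1)
  have hsplit : P * p + n % p = n := by
    rw [hPd, mul_comm]; exact Nat.div_add_mod n p
  have hplow : 10 ≤ p := by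
    rw [hp, pow_succ]
    nlinarith [Nat.one_le_pow k 10 (by norm_num : 0 < 10)]
  apply pvLzf_eq
  · omega
  · exact pvNozero_concat (k + 1) P hP1 hnz
  · intro j hj1 hj2
    have hlo : P * p ≤ j := by omega
    have hhi : j < (P + 1) * p := by
      have he : (P + 1) * p = P * p + p := by ring
      omega
    have hjP : j / p = P := Nat.div_eq_of_lt_le hlo hhi
    have hjsplit : P * p + j % p = j := by
      rw [← hjP, mul_comm]; exact Nat.div_add_mod j p
    have hjm : j % p < pvRep (k + 1) := by omega
    have hz2 := pvZero_below_rep k P (j % p) hP1 hjm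
    rw [← hp] at hz2
    rw [hjsplit] at hz2
    rw [pvHasZ_eq j (by omega)]
    exact hz2

lemma pvHasZ_one : pvHasZ 1 = false := by
  rw [pvHasZ_eq _ (by omega), pvZ_eq _ (by omega)]
  norm_num [pvZ_zero]

lemma pvLzf_zero : pvLzf 0 = 1 :=
  pvLzf_eq 0 1 (by omega) pvHasZ_one (fun j h1 h2 => by
    have : j = 0 := by omega
    simp [this, pvHasZ])

lemma pvLzf_bound (n : Nat) : pvLzf n ≤ 2 * n + 1 := by
  rcases Nat.eq_zero_or_pos n with h0 | hpos
  · subst h0; rw [pvLzf_zero]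
  · by_cases hz : pvZ n = true
    · obtain ⟨hd, hnz, h10⟩ := pvHz_spec n hz
      rw [pvLzf_char n hz]
      have h1 : n / 10 ^ (pvHz n + 1) * 10 ^ (pvHz n + 1) ≤ n := Nat.div_mul_le_self n _
      have h2 : pvRep (pvHz n + 1) < 10 ^ (pvHz n + 1) := pvRep_lt_pow _
      have h3 : 10 ^ (pvHz n + 1) ≤ n := by
        have := (Nat.le_div_iff_mul_le (Nat.pow_pos (by norm_num))).mp h10
        rw [pow_succ]; omega
      omega
    · rw [pvLzf_of_nozero n (by rw [pvHasZ_eq _ (by omega)]; simpa using hz)]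
      omega

-- ---- the two step functions both compute pvLzf ----

lemma pvNextZeroFree_eq_lzf (i : Int) (h : 0 ≤ i) :
    pvNextZeroFree i = (pvLzf i.toNat : Int) := by
  have hi : ((i.toNat : Nat) : Int) = i := Int.toNat_of_nonneg h
  set n := i.toNat with hn
  rcases Nat.eq_zero_or_pos n with h0 | hpos
  · have : i = 0 := by omega
    rw [this, pvNextZeroFree, if_pos rfl]
    rw [show n = 0 by omega, pvLzf_zero]
    rfl
  · have hne : i ≠ 0 := by omega
    rw [pvNextZeroFree, if_neg hne]
    have hscan : pvScanP i 1 0 = if pvZ n then 1 * (10 : Int) ^ (pvHz n + 1) else 0 := by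
      rw [← hi]; exact pvScanP_spec n 1 0
    by_cases hz : pvZ n = true
    · rw [hscan, if_pos hz]
      set k := pvHz n with hk
      have hcast : (1 : Int) * (10 : Int) ^ (k + 1) = ((10 ^ (k + 1) : Nat) : Int) := by
        push_cast; ring
      have hppos : 0 < 10 ^ (k + 1) := Nat.pow_pos (by norm_num)
      rw [hcast, if_neg (by exact_mod_cast hppos.ne')]
      have hfd : PySem.Int.floordiv i ((10 ^ (k + 1) : Nat) : Int) = ((n / 10 ^ (k + 1) : Nat) : Int) := by
        rw [← hi]; exact_mod_cast PySem.Int.floordiv_natCast n (10 ^ (k + 1))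
      have hsub : ((10 ^ (k + 1) : Nat) : Int) - 1 = ((10 ^ (k + 1) - 1 : Nat) : Int) := by
        push_cast [hppos]; omega
      have hfd9 : PySem.Int.floordiv ((10 ^ (k + 1) - 1 : Nat) : Int) 9 = (((10 ^ (k + 1) - 1) / 9 : Nat) : Int) := by
        exact_mod_cast PySem.Int.floordiv_natCast (10 ^ (k + 1) - 1) 9
      have hrep : (10 ^ (k + 1) - 1) / 9 = pvRep (k + 1) := by
        have h9 := pvRep_mul_nine (k + 1)
        have : 10 ^ (k + 1) - 1 = 9 * pvRep (k + 1) := by omega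
        rw [this, Nat.mul_div_cancel_left _ (by norm_num : 0 < 9)]
      rw [hfd, hsub, hfd9, hrep, pvLzf_char n hz]
      push_cast
      ring
    · rw [hscan, if_neg hz, if_pos rfl]
      rw [pvLzf_of_nozero n (by rw [pvHasZ_eq _ (by omega)]; simpa using hz), hi]

lemma pvSkipZeros_eq_lzf (fuel : Nat) : ∀ (i : Int), 0 ≤ i → pvLzf i.toNat ≤ i.toNat + fuel →
    pvSkipZeros fuel i = (pvLzf i.toNat : Int) := by
  induction fuel with
  | zero =>
    intro i h hb
    have h1 := pvLzf_ge i.toNat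
    have h2 : pvLzf i.toNat = i.toNat := by omega
    rw [h2]
    simp [pvSkipZeros]
    omega
  | succ fuel ih =>
    intro i h hb
    rw [show pvSkipZeros (fuel + 1) i = if PySem.Str.isIn "0" (PySem.Int.toStr i) then pvSkipZeros fuel (i + 1) else i from rfl]
    rw [pvCond_bridge i h]
    by_cases hz : pvHasZ i.toNat = true
    · rw [if_pos hz]
      have hto : (i + 1).toNat = i.toNat + 1 := by omega
      rw [ih (i + 1) (by omega) (by rw [hto, pvLzf_succ _ hz]; omega)]
      rw [hto, pvLzf_succ _ hz]
    · rw [Bool.not_eq_true] at hz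
      rw [if_neg (by simp [hz])]
      rw [pvLzf_of_nozero _ hz]
      omega

lemma pvStep_eq (i : Int) (h : 0 ≤ i) :
    pvSkipZeros (2 * i + 2).toNat i = pvNextZeroFree i := by
  rw [pvNextZeroFree_eq_lzf i h, pvSkipZeros_eq_lzf _ i h]
  have := pvLzf_bound i.toNat
  omega

lemma pvFold_eq (l : List Char) : ∀ (i : Int) (d1 : PySem.Dict Int String) (d2 : PySem.Dict String Int), 0 ≤ i →
    l.foldl (fun (st : Int × PySem.Dict Int String × PySem.Dict String Int) ch =>
      let j := pvSkipZeros (2 * st.1 + 2).toNat st.1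
      (j + 1, st.2.1.insert j (String.ofList [ch]), st.2.2.insert (String.ofList [ch]) j)) (i, d1, d2)
    = l.foldl (fun (st : Int × PySem.Dict Int String × PySem.Dict String Int) ch =>
      let j := pvNextZeroFree st.1
      (j + 1, st.2.1.insert j (String.ofList [ch]), st.2.2.insert (String.ofList [ch]) j)) (i, d1, d2) := by
  induction l with
  | nil => intro i d1 d2 h; rfl
  | cons c l ih =>
    intro i d1 d2 h
    simp only [List.foldl_cons, pvStep_eq i h]
    apply ih
    have h1 : i ≤ pvNextZeroFree i := by
      rw [pvNextZeroFree_eq_lzf i h]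
      have := pvLzf_ge i.toNat; omega
    omega

-- the accumulator of Source B's codes list splits off
lemma pvCodes_acc (l : List Char) : ∀ (i : Int) (acc : List Int),
    l.foldl (fun (st : Int × List Int) _ =>
      let j := pvNextZeroFree st.1
      (j + 1, st.2 ++ [j])) (i, acc)
    = ((l.foldl (fun (st : Int × List Int) _ =>
        let j := pvNextZeroFree st.1
        (j + 1, st.2 ++ [j])) (i, ([] : List Int))).1,
       acc ++ (l.foldl (fun (st : Int × List Int) _ =>
        let j := pvNextZeroFree st.1
        (j + 1, st.2 ++ [j])) (i, ([] : List Int))).2) := by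
  induction l with
  | nil => intro i acc; simp
  | cons c l ih =>
    intro i acc
    simp only [List.foldl_cons]
    rw [ih (pvNextZeroFree i + 1) (acc ++ [pvNextZeroFree i]),
        ih (pvNextZeroFree i + 1) ([] ++ [pvNextZeroFree i])]
    simp

-- interleaved dict building (A's loop shape) = codes list first, then zip into each dict (B's shape)
lemma pvFold_zip (l : List Char) : ∀ (i : Int) (d1 : PySem.Dict Int String) (d2 : PySem.Dict String Int),
    (l.foldl (fun (st : Int × PySem.Dict Int String × PySem.Dict String Int) ch =>
      let j := pvNextZeroFree st.1
      (j + 1, st.2.1.insert j (String.ofList [ch]), st.2.2.insert (String.ofList [ch]) j)) (i, d1, d2)).2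
    = (d1.update ((l.foldl (fun (st : Int × List Int) _ =>
          let j := pvNextZeroFree st.1
          (j + 1, st.2 ++ [j])) (i, ([] : List Int))).2.zip (l.map (fun ch => String.ofList [ch]))),
       d2.update ((l.map (fun ch => String.ofList [ch])).zip (l.foldl (fun (st : Int × List Int) _ =>
          let j := pvNextZeroFree st.1
          (j + 1, st.2 ++ [j])) (i, ([] : List Int))).2)) := by
  induction l with
  | nil => intro i d1 d2; rfl
  | cons c l ih =>
    intro i d1 d2
    simp only [List.foldl_cons, List.map_cons]
    rw [ih (pvNextZeroFree i + 1) (d1.insert (pvNextZeroFree i) (String.ofList [c]))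
           (d2.insert (String.ofList [c]) (pvNextZeroFree i))]
    rw [pvCodes_acc l (pvNextZeroFree i + 1) ([] ++ [pvNextZeroFree i])]
    simp only [List.nil_append]
    rfl

-- ===== VERDICT (by name: the statement is the Claim_ definition above) =====
theorem make_alphabet_dicts_from_str_spec : Claim_equal_make_alphabet_dicts_from_str := by
  intro s start_num _ hpre
  unfold Spec_make_alphabet_dicts_from_str
  unfold make_alphabet_dicts_from_str make_alphabet_dicts_from_str_alt
  rw [pvFold_eq s.toList start_num PySem.Dict.empty PySem.Dict.empty hpre.1]
  rw [show ∀ (x : Int × PySem.Dict Int String × PySem.Dict String Int), (x.2.1.items, x.2.2.items) = ((x.2).1.items, (x.2).2.items) from fun _ => rfl]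
  rw [pvFold_zip s.toList start_num PySem.Dict.empty PySem.Dict.empty]
  rfl
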